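-- pv_equiv track=rewrite | github.com/daniel-reich/ubiquitous-fiesta | XALogvSrMr3LRwXPH_24.py | is_shuffled_well
-- ===== SOURCE A (Python) =====
-- def is_shuffled_well(lst):
--     c = 0
--     for i in range(len(lst) - 2):
--         if lst[i] + 1 == lst[i + 1] or lst[i + 1] + 1 == lst[i]:
--             c += 1
--         else:
--             c = 0
--         if c >= 2:
--             return False
--     return True
-- ===== SOURCE B (Python) =====
-- def is_shuffled_well(lst):
--     adj = [a + 1 == b or b + 1 == a for a, b in zip(lst, lst[1:])]
--     return not any(adj[i] and adj[i + 1] for i in range(len(lst) - 3))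
-- ===== Notes on version B (the rewrite author's own statement) =====
-- stated objective: alternative
-- what changed: Replaces A's stateful running counter (reset-on-miss, early return at 2) with a precomputed adjacency table zip(lst, lst[1:]) scanned for two consecutive hits over the same index range range(len(lst)-3).
import Mathlib
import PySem

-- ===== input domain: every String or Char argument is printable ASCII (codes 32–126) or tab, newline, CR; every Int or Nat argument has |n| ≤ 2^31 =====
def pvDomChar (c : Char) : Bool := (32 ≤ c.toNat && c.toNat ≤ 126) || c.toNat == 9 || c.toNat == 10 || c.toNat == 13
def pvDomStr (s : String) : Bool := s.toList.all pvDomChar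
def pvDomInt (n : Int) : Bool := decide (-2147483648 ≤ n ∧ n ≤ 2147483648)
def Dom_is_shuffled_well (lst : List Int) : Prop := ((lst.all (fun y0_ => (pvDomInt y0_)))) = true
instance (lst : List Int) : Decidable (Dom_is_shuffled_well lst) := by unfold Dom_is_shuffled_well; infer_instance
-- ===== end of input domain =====

-- B replaces A's running counter with a precomputed adjacency table scanned for two
-- consecutive hits over the same index range (objective: alternative decomposition, same cost).

-- ===== PORT A =====
-- indices drawn from range(len(lst)-2) are always in bounds, so pyGetD's default 0 is never read
def iswA_loop (lst : List Int) : Int → List Int → Bool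
  | _, [] => true
  | c, i :: rest =>
    let c' : Int :=
      if PySem.List.pyGetD lst i 0 + 1 == PySem.List.pyGetD lst (i + 1) 0
          || PySem.List.pyGetD lst (i + 1) 0 + 1 == PySem.List.pyGetD lst i 0
      then c + 1 else 0
    if c' ≥ 2 then false else iswA_loop lst c' rest

def is_shuffled_well (lst : List Int) : Bool :=
  iswA_loop lst 0 (PySem.List.pyRange 0 ((lst.length : Int) - 2) 1)

-- ===== PORT B =====
def is_shuffled_well_alt (lst : List Int) : Bool :=
  let adj : List Bool :=
    (lst.zip (PySem.List.slice lst (some 1) none)).map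
      (fun p => decide (p.1 + 1 = p.2) || decide (p.2 + 1 = p.1))
  !((PySem.List.pyRange 0 ((lst.length : Int) - 3) 1).any
      (fun i => PySem.List.pyGetD adj i false && PySem.List.pyGetD adj (i + 1) false))

-- ===== PRECONDITION & SPEC =====
def Spec_is_shuffled_well (lst : List Int) (out : Bool) : Prop := out = is_shuffled_well_alt lst
instance (lst : List Int) (out : Bool) : Decidable (Spec_is_shuffled_well lst out) := by unfold Spec_is_shuffled_well; infer_instance

-- ===== CLAIM (what is proved, stated in full; the proofs are below) =====
def Claim_equal_is_shuffled_well : Prop := ∀ (lst : List Int), Dom_is_shuffled_well lst → Spec_is_shuffled_well lst (is_shuffled_well lst)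

-- ===== LEMMAS AND PROOFS =====

-- the adjacency test A performs at index i
def adjI (lst : List Int) (i : Int) : Bool :=
  PySem.List.pyGetD lst i 0 + 1 == PySem.List.pyGetD lst (i + 1) 0
    || PySem.List.pyGetD lst (i + 1) 0 + 1 == PySem.List.pyGetD lst i 0

-- invariant of A's counter loop: with c ∈ {0,1}, running over range(k, k+m) it returns
-- false iff (c=1 and the first pair is adjacent) or some two consecutive pairs in the
-- window are both adjacent
theorem iswA_loop_range (lst : List Int) (m : Nat) :
    ∀ (k : Int) (c : Int), c = 0 ∨ c = 1 →
    iswA_loop lst c (PySem.List.pyRange k (k + m) 1) =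
      (if c = 1 ∧ 0 < m ∧ adjI lst k = true then false
       else !((PySem.List.pyRange k (k + (m : Int) - 1) 1).any
               (fun j => adjI lst j && adjI lst (j + 1)))) := by
  induction m with
  | zero =>
    intro k c _
    simp [PySem.List.pyRange_one_eq_nil, iswA_loop]
  | succ m ih =>
    intro k c hc
    rw [show (k + ((m : Nat) + 1 : Nat) : Int) = k + (m : Int) + 1 by push_cast; ring,
      PySem.List.pyRange_one_cons (by omega : k < k + (m : Int) + 1)]
    show (let c' : Int := if adjI lst k then c + 1 else 0;
          if c' ≥ 2 then false else iswA_loop lst c' (PySem.List.pyRange (k+1) (k + (m:Int) + 1) 1)) = _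
    rw [show (k + (m:Int) + 1) = (k+1) + (m : Nat) by ring]
    by_cases ha : adjI lst k = true
    · rcases hc with h0 | h1
      · subst h0
        simp only [ha, if_true, show ((0:Int) + 1 ≥ 2) = False by norm_num, if_false]
        rw [show (0:Int) + 1 = 1 from by norm_num, ih (k+1) 1 (Or.inr rfl)]
        rcases Nat.eq_zero_or_pos m with hm | hm
        · subst hm
          simp [PySem.List.pyRange_one_eq_nil]
        · rw [PySem.List.pyRange_one_cons (by omega : k < k + 1 + (m : Int) - 1)]
          simp only [List.any_cons, ha, Bool.true_and]
          by_cases hb : adjI lst (k+1) = true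
          · simp [hb, hm]
          · simp [hb, hm]
      · subst h1
        simp [ha]
    · have ha' : adjI lst k = false := by simp [Bool.not_eq_true] at ha; exact ha
      simp only [ha', if_false, Bool.false_eq_true, show ((0:Int) ≥ 2) = False by simp,
        if_false, and_false, false_and]
      rw [ih (k+1) 0 (Or.inl rfl), if_neg (by simp)]
      rcases Nat.eq_zero_or_pos m with hm | hm
      · subst hm
        simp [PySem.List.pyRange_one_eq_nil]
      · rw [PySem.List.pyRange_one_cons (by omega : k < k + 1 + (m : Int) - 1)]
        simp only [List.any_cons, ha', Bool.false_and, Bool.false_or]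

-- A returns true iff no index j in range(len-3) starts two consecutive adjacent pairs
theorem isA_char (lst : List Int) :
    is_shuffled_well lst =
      !((PySem.List.pyRange 0 ((lst.length : Int) - 3) 1).any
          (fun j => adjI lst j && adjI lst (j + 1))) := by
  unfold is_shuffled_well
  rcases Nat.lt_or_ge lst.length 2 with h | h
  · rw [PySem.List.pyRange_one_eq_nil (by omega), PySem.List.pyRange_one_eq_nil (by omega)]
    simp [iswA_loop]
  · have hx := iswA_loop_range lst (lst.length - 2) 0 0 (Or.inl rfl)
    rw [if_neg (by simp)] at hx
    rw [show ((lst.length : Int) - 2) = 0 + ((lst.length - 2 : Nat) : Int) by omega, hx,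
      show ((0:Int) + ((lst.length - 2 : Nat) : Int) - 1) = (lst.length : Int) - 3 by omega]

-- B's table entry agrees with A's test at every in-range index
theorem adj_table_get (lst : List Int) (i : Int) (h0 : 0 ≤ i)
    (h1 : i + 1 < (lst.length : Int)) :
    PySem.List.pyGetD
      ((lst.zip (PySem.List.slice lst (some 1) none)).map
        (fun p => decide (p.1 + 1 = p.2) || decide (p.2 + 1 = p.1))) i false
      = adjI lst i := by
  rw [PySem.List.slice_from_one]
  have hlen : ((lst.zip lst.tail).map
      (fun p : Int × Int => decide (p.1 + 1 = p.2) || decide (p.2 + 1 = p.1))).length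
      = lst.length - 1 := by
    simp [List.length_zip, List.length_tail]
  rw [PySem.List.pyGetD_eq_getElem _ false h0 (by rw [hlen]; omega)]
  unfold adjI
  rw [PySem.List.pyGetD_eq_getElem lst 0 h0 (by omega : i < (lst.length : Int)),
    PySem.List.pyGetD_eq_getElem lst 0 (by omega : (0:Int) ≤ i + 1) h1]
  have h2 : (i + 1).toNat = i.toNat + 1 := by omega
  simp only [List.getElem_map, List.getElem_zip, List.getElem_tail, h2, beq_eq_decide]

-- ===== VERDICT (by name: the statement is the Claim_ definition above) =====
theorem is_shuffled_well_spec : Claim_equal_is_shuffled_well := by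
  intro lst _
  unfold Spec_is_shuffled_well
  rw [isA_char]
  show _ = !((PySem.List.pyRange 0 ((lst.length : Int) - 3) 1).any (fun i =>
      PySem.List.pyGetD ((lst.zip (PySem.List.slice lst (some 1) none)).map
        (fun p => decide (p.1 + 1 = p.2) || decide (p.2 + 1 = p.1))) i false
      && PySem.List.pyGetD ((lst.zip (PySem.List.slice lst (some 1) none)).map
        (fun p => decide (p.1 + 1 = p.2) || decide (p.2 + 1 = p.1))) (i + 1) false))
  congr 1
  apply PySem.List.any_congr_mem
  intro j hj
  rw [PySem.List.mem_pyRange_one] at hj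
  rw [adj_table_get lst j hj.1 (by omega), adj_table_get lst (j+1) (by omega) (by omega)]
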